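-- pv_equiv track=rewrite | github.com/mhetrerajat/ds-challenge | codechef/FEB19B/secret_ingredient.py | get_secret_ingredients
-- ===== SOURCE A (Python) =====
-- from collections import Counter
--
-- def get_secret_ingredients(n, dishes):
--     if dishes:
--         c = Counter(dishes[0])
--         for d in dishes[1:]:
--             c &= Counter(d)
--
--         return len(c.keys())
--     else:
--         return 0
-- ===== SOURCE B (Python) =====
-- def get_secret_ingredients(n, dishes):
--     cnt = {}
--     for d in dishes:
--         for e in set(d):
--             cnt[e] = cnt.get(e, 0) + 1
--     return sum(1 for v in cnt.values() if v == len(dishes))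
-- ===== Notes on version B (the rewrite author's own statement) =====
-- stated objective: alternative
-- what changed: Replaces the fold of Counter intersections with a single global frequency pass: one dict counts, for each ingredient, how many dishes contain it, and the answer is the number of ingredients whose count equals len(dishes).
import Mathlib
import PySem

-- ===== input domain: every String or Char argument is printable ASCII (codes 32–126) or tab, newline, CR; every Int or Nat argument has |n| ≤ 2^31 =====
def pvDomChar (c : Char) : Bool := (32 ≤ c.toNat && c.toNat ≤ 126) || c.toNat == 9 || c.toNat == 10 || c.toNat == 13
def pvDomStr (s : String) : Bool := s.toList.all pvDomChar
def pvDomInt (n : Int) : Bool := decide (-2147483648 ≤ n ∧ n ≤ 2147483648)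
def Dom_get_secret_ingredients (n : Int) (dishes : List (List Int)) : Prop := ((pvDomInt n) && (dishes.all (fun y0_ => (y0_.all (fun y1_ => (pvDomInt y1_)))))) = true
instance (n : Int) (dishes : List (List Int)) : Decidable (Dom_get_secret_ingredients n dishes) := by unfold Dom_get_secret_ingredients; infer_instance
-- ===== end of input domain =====

-- ===== PORT A =====
-- Counter & Counter: for (elem, count) in self.items(): newcount = min(count, other[elem]); keep if > 0.
def pyAndCounter (c d : PySem.Dict Int Int) : PySem.Dict Int Int :=
  c.items.foldl (fun acc kv =>
    let m := min kv.2 (d.getD kv.1 0)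
    if 0 < m then acc.insert kv.1 m else acc) PySem.Dict.empty

def get_secret_ingredients (n : Int) (dishes : List (List Int)) : Int :=
  match dishes with
  | [] => 0
  | d0 :: rest =>
    let c := rest.foldl (fun c dd => pyAndCounter c (PySem.Dict.counter dd)) (PySem.Dict.counter d0)
    (c.keys.length : Int)

-- ===== PORT B =====
-- One global frequency dict: cnt[e] = number of dishes containing e; answer = #{values = len(dishes)}.
def get_secret_ingredients_alt (n : Int) (dishes : List (List Int)) : Int :=
  let cnt := dishes.foldl (fun acc dd =>
    (PySem.Set.ofList dd).foldl (fun a e => a.insert e (a.getD e 0 + 1)) acc) PySem.Dict.empty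
  ((cnt.values.filter (fun v => v == (dishes.length : Int))).length : Int)

-- ===== PRECONDITION & SPEC =====
def Spec_get_secret_ingredients (n : Int) (dishes : List (List Int)) (out : Int) : Prop := out = get_secret_ingredients_alt n dishes
instance (n : Int) (dishes : List (List Int)) (out : Int) : Decidable (Spec_get_secret_ingredients n dishes out) := by unfold Spec_get_secret_ingredients; infer_instance

-- ===== CLAIM (what is proved, stated in full; the proofs are below) =====
def Claim_equal_get_secret_ingredients : Prop := ∀ (n : Int) (dishes : List (List Int)), Dom_get_secret_ingredients n dishes → Spec_get_secret_ingredients n dishes (get_secret_ingredients n dishes)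

-- ===== LEMMAS AND PROOFS =====

-- ---- A side ----

/-- The fold inside `pyAndCounter`: over fresh, distinct keys it appends exactly the
surviving (key, min-count) pairs. -/
theorem pyAndCounter_aux (d : PySem.Dict Int Int) (l : List (Int × Int)) (acc : PySem.Dict Int Int)
    (hnd : (l.map Prod.fst).Nodup) (hfresh : ∀ kv ∈ l, acc.contains kv.1 = false) :
    (l.foldl (fun acc kv =>
      if 0 < min kv.2 (d.getD kv.1 0) then acc.insert kv.1 (min kv.2 (d.getD kv.1 0)) else acc) acc).items
    = acc.items ++ l.filterMap (fun kv =>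
        if 0 < min kv.2 (d.getD kv.1 0) then some (kv.1, min kv.2 (d.getD kv.1 0)) else none) := by
  induction l generalizing acc with
  | nil => simp
  | cons kv t ih =>
    simp only [List.map_cons, List.nodup_cons] at hnd
    simp only [List.foldl_cons, List.filterMap_cons]
    by_cases hm : 0 < min kv.2 (d.getD kv.1 0)
    · have hco : acc.contains kv.1 = false := hfresh kv (by simp)
      have step : ∀ kv' ∈ t, (acc.insert kv.1 (min kv.2 (d.getD kv.1 0))).contains kv'.1 = false := by
        intro kv' hkv'
        rw [PySem.Dict.contains_insert]
        have h1 : kv'.1 ≠ kv.1 := by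
          intro h; exact hnd.1 (h ▸ List.mem_map_of_mem hkv')
        have h2 : acc.contains kv'.1 = false := hfresh kv' (by simp [hkv'])
        simp [h1, h2]
      rw [if_pos hm, ih _ hnd.2 step, PySem.Dict.items_insert_of_not_contains _ _ hco]
      simp [hm]
    · rw [if_neg hm, ih _ hnd.2 (fun kv' h => hfresh kv' (by simp [h]))]
      simp [hm]

theorem pyAndCounter_items (c d : PySem.Dict Int Int) (hnd : c.keys.Nodup) :
    (pyAndCounter c d).items
    = c.items.filterMap (fun kv =>
        if 0 < min kv.2 (d.getD kv.1 0) then some (kv.1, min kv.2 (d.getD kv.1 0)) else none) := by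
  unfold pyAndCounter
  have h := pyAndCounter_aux d c.items PySem.Dict.empty hnd (fun kv _ => PySem.Dict.contains_empty _)
  simpa using h

/-- `Good c`: keys unique and every stored count positive — invariant of the A-side fold. -/
def GoodCtr (c : PySem.Dict Int Int) : Prop :=
  c.keys.Nodup ∧ ∀ kv ∈ c.items, 0 < kv.2

theorem goodCtr_counter (xs : List Int) : GoodCtr (PySem.Dict.counter xs) := by
  refine ⟨PySem.Dict.nodup_keys_counter xs, ?_⟩
  intro kv hkv
  rw [PySem.Dict.items_counter] at hkv
  obtain ⟨k, hk, rfl⟩ := List.mem_map.mp hkv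
  have hmem : k ∈ xs := (PySem.Set.mem_ofList _ _).mp hk
  show (0 : Int) < (xs.count k : Int)
  exact_mod_cast List.count_pos_iff.mpr hmem

theorem filterMap_keys_aux (dd : List Int) (l : List (Int × Int)) (hpos : ∀ kv ∈ l, 0 < kv.2) :
    (l.filterMap (fun kv =>
        if 0 < min kv.2 ((PySem.Dict.counter dd).getD kv.1 0)
        then some (kv.1, min kv.2 ((PySem.Dict.counter dd).getD kv.1 0)) else none)).map Prod.fst
    = (l.filter (fun kv => decide (kv.1 ∈ dd))).map Prod.fst := by
  induction l with
  | nil => rfl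
  | cons kv t ih =>
    have hp : 0 < kv.2 := hpos kv (by simp)
    have iht := ih (fun kv' h => hpos kv' (by simp [h]))
    simp only [List.filterMap_cons, List.filter_cons, PySem.Dict.getD_counter]
    by_cases hmem : kv.1 ∈ dd
    · have hc : (0:Int) < (dd.count kv.1 : Int) := by exact_mod_cast List.count_pos_iff.mpr hmem
      rw [if_pos (lt_min hp hc)]
      simp only [hmem, decide_true, if_true, List.map_cons]
      simp only [PySem.Dict.getD_counter] at iht
      rw [iht]
    · have hc : (dd.count kv.1 : Int) = 0 := by exact_mod_cast List.count_eq_zero_of_not_mem hmem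
      rw [if_neg (by rw [hc]; exact not_lt.mpr (min_le_right _ _))]
      simp only [hmem, decide_false, Bool.false_eq_true, if_false]
      simp only [PySem.Dict.getD_counter] at iht
      rw [iht]

theorem pyAndCounter_keys (c : PySem.Dict Int Int) (dd : List Int) (hg : GoodCtr c) :
    (pyAndCounter c (PySem.Dict.counter dd)).keys
    = c.keys.filter (fun k => decide (k ∈ dd)) := by
  have hitems := pyAndCounter_items c (PySem.Dict.counter dd) hg.1
  simp only [PySem.Dict.keys]
  rw [hitems, filterMap_keys_aux dd c.items hg.2, List.filter_map]
  rfl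

theorem pyAndCounter_good (c : PySem.Dict Int Int) (dd : List Int) (hg : GoodCtr c) :
    GoodCtr (pyAndCounter c (PySem.Dict.counter dd)) := by
  constructor
  · rw [pyAndCounter_keys c dd hg]
    exact hg.1.filter _
  · intro kv hkv
    rw [pyAndCounter_items c (PySem.Dict.counter dd) hg.1] at hkv
    obtain ⟨kv', _, hkv'⟩ := List.mem_filterMap.mp hkv
    split at hkv'
    · cases hkv'; assumption
    · cases hkv'

theorem a_fold_keys (rest : List (List Int)) (c : PySem.Dict Int Int) (hg : GoodCtr c) :
    (rest.foldl (fun c dd => pyAndCounter c (PySem.Dict.counter dd)) c).keys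
    = c.keys.filter (fun x => rest.all (fun dd => decide (x ∈ dd))) := by
  induction rest generalizing c with
  | nil => simp
  | cons dd t ih =>
    simp only [List.foldl_cons]
    rw [ih _ (pyAndCounter_good c dd hg), pyAndCounter_keys c dd hg, List.filter_filter]
    apply List.filter_congr
    intro x _
    simp [List.all_cons, Bool.and_comm]

-- ---- B side ----

theorem b_getD (dishes : List (List Int)) (acc : PySem.Dict Int Int) (x : Int) :
    (dishes.foldl (fun acc dd =>
      (PySem.Set.ofList dd).foldl (fun a e => a.insert e (a.getD e 0 + 1)) acc) acc).getD x 0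
    = acc.getD x 0 + ((dishes.countP (fun dd => decide (x ∈ dd)) : Int)) := by
  induction dishes generalizing acc with
  | nil => simp
  | cons dd t ih =>
    simp only [List.foldl_cons]
    rw [ih]
    rw [PySem.Dict.getD_foldl_insert_add_one]
    have hc : ((PySem.Set.ofList dd).count x : Int) = if x ∈ dd then 1 else 0 := by
      by_cases h : x ∈ dd
      · have hm : x ∈ PySem.Set.ofList dd := (PySem.Set.mem_ofList _ _).mpr h
        simp [h]
      · have hm : x ∉ PySem.Set.ofList dd := fun hx => h ((PySem.Set.mem_ofList _ _).mp hx)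
        simp [h, List.count_eq_zero_of_not_mem hm]
    rw [hc, List.countP_cons]
    by_cases h : x ∈ dd <;> simp [h] <;> omega

theorem b_keys_nodup (dishes : List (List Int)) (acc : PySem.Dict Int Int) (h : acc.keys.Nodup) :
    (dishes.foldl (fun acc dd =>
      (PySem.Set.ofList dd).foldl (fun a e => a.insert e (a.getD e 0 + 1)) acc) acc).keys.Nodup := by
  induction dishes generalizing acc with
  | nil => exact h
  | cons dd t ih =>
    exact ih _ (PySem.Dict.nodup_keys_foldl_insert _ _ _ h)

theorem b_mem_keys (dishes : List (List Int)) (acc : PySem.Dict Int Int) (x : Int) :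
    x ∈ (dishes.foldl (fun acc dd =>
      (PySem.Set.ofList dd).foldl (fun a e => a.insert e (a.getD e 0 + 1)) acc) acc).keys
    ↔ x ∈ acc.keys ∨ ∃ dd ∈ dishes, x ∈ dd := by
  induction dishes generalizing acc with
  | nil => simp
  | cons dd t ih =>
    simp only [List.foldl_cons]
    rw [ih, PySem.Dict.keys_foldl_insert, PySem.Set.mem_update, PySem.Set.mem_ofList]
    constructor
    · rintro (((h | h) | ⟨d, hd, hx⟩))
      · exact Or.inl h
      · exact Or.inr ⟨dd, by simp, h⟩
      · exact Or.inr ⟨d, by simp [hd], hx⟩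
    · rintro (h | ⟨d, hd, hx⟩)
      · exact Or.inl (Or.inl h)
      · rcases List.mem_cons.mp hd with rfl | hd
        · exact Or.inl (Or.inr hx)
        · exact Or.inr ⟨d, hd, hx⟩

-- ---- putting it together ----

theorem main_eq (n : Int) (dishes : List (List Int)) :
    get_secret_ingredients n dishes = get_secret_ingredients_alt n dishes := by
  cases dishes with
  | nil => rfl
  | cons d0 rest =>
    unfold get_secret_ingredients get_secret_ingredients_alt
    simp only []
    set F := fun (acc : PySem.Dict Int Int) (dd : List Int) =>
      (PySem.Set.ofList dd).foldl (fun a e => a.insert e (a.getD e 0 + 1)) acc with hF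
    set cnt := (d0 :: rest).foldl F PySem.Dict.empty with hcnt
    have hnodup : cnt.keys.Nodup := b_keys_nodup _ _ (by simp)
    -- B's value as a filter over cnt.keys
    have hvals : cnt.values = cnt.keys.map (fun k => cnt.getD k 0) :=
      PySem.Dict.values_eq_map_keys cnt hnodup 0
    rw [hvals, List.filter_map]
    rw [List.length_map]
    -- both sides are lengths of nodup filters with the same membership
    have hA : ((rest.foldl (fun c dd => pyAndCounter c (PySem.Dict.counter dd))
        (PySem.Dict.counter d0)).keys)
        = (PySem.Dict.counter d0).keys.filter (fun x => rest.all (fun dd => decide (x ∈ dd))) :=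
      a_fold_keys rest _ (goodCtr_counter d0)
    rw [hA, PySem.Dict.keys_counter]
    congr 1
    -- lengths equal via permutation of nodup lists with equal membership
    have hLA : ((PySem.Set.ofList d0).filter (fun x => rest.all (fun dd => decide (x ∈ dd)))).Nodup :=
      (PySem.Set.nodup_ofList d0).filter _
    have hLB : (cnt.keys.filter ((fun v => v == ((d0 :: rest).length : Int)) ∘ fun k => cnt.getD k 0)).Nodup :=
      hnodup.filter _
    apply ((List.perm_ext_iff_of_nodup hLA hLB).2 ?_).length_eq
    intro x
    simp only [List.mem_filter, PySem.Set.mem_ofList, Function.comp]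
    have hget : cnt.getD x 0 = ((d0 :: rest).countP (fun dd => decide (x ∈ dd)) : Int) := by
      rw [hcnt, b_getD]; simp
    have hmem := b_mem_keys (d0 :: rest) PySem.Dict.empty x
    rw [← hcnt] at hmem
    constructor
    · rintro ⟨hx0, hall⟩
      have hallP : ∀ dd ∈ (d0 :: rest), x ∈ dd := by
        intro dd hdd
        rcases List.mem_cons.mp hdd with rfl | hdd
        · exact hx0
        · simpa using (List.all_eq_true.mp hall) dd hdd
      refine ⟨hmem.mpr (Or.inr ⟨d0, by simp, hx0⟩), ?_⟩
      rw [hget]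
      have : (d0 :: rest).countP (fun dd => decide (x ∈ dd)) = (d0 :: rest).length := by
        rw [List.countP_eq_length]
        intro dd hdd; exact decide_eq_true (hallP dd hdd)
      simp [this]
    · rintro ⟨hxk, heq⟩
      rw [hget] at heq
      have hcount : (d0 :: rest).countP (fun dd => decide (x ∈ dd)) = (d0 :: rest).length := by
        have := beq_iff_eq.mp heq
        exact_mod_cast this
      have hallP := List.countP_eq_length.mp hcount
      refine ⟨by simpa using hallP d0 (by simp), ?_⟩
      rw [List.all_eq_true]
      intro dd hdd
      exact hallP dd (by simp [hdd])

-- ===== VERDICT (by name: the statement is the Claim_ definition above) =====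
theorem get_secret_ingredients_spec : Claim_equal_get_secret_ingredients := by
  intro n dishes _
  unfold Spec_get_secret_ingredients
  exact main_eq n dishes
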